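-- pv_equiv track=rewrite | github.com/shinchen03/leetcode | test/Ntest.py | calc_f
-- ===== SOURCE A (Python) =====
-- def calc_f(num):
--     if num < 1024 and num > 0:
--         return 1
--     res = 0
--     nums = []
--     nums.append(num)
--     while len(nums) > 0:
--         n = nums.pop(0)
--         if n >= 1024:
--             nums.append(n - 1)
--             nums.append(n - 1024)
--         else:
--             res += 1
--     return res
-- ===== SOURCE B (Python) =====
-- # Bottom-up DP over n instead of expanding the recursion tree: O(num) instead of exponential.
-- def calc_f(num):
--     if num < 1024:
--         return 1
--     dp = [1] * 1024
--     for n in range(1024, num + 1):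
--         dp.append(dp[n - 1] + dp[n - 1024])
--     return dp[num]
-- ===== Notes on version B (the rewrite author's own statement) =====
-- stated objective: faster
-- what changed: Replaced A's exponential breadth-first expansion of the recursion tree of f(n)=f(n-1)+f(n-1024) by a bottom-up DP table filled once from 1024 to num.
import Mathlib
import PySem

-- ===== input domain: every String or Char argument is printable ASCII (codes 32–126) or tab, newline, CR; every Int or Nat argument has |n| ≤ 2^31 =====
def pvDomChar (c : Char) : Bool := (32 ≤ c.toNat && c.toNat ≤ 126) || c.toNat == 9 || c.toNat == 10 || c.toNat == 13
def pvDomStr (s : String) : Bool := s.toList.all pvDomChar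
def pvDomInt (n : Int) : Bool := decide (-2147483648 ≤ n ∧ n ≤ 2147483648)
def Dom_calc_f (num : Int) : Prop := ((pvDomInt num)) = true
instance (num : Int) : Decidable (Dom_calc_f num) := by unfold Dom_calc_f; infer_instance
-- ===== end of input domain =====

-- B replaces A's exponential breadth-first expansion of the recursion tree by a bottom-up
-- DP table filled once (objective: faster, asymptotically).

-- ===== PORT A =====
-- termination measure for A's work-queue loop: total node count of the recursion tree
def pvT (n : Int) : Nat :=
  if n < 1024 then 1 else pvT (n - 1) + pvT (n - 1024) + 1
termination_by n.toNat
decreasing_by all_goals omega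

theorem pvT_pos (n : Int) : 1 ≤ pvT n := by
  rw [pvT]; split <;> omega

theorem pvT_big {n : Int} (h : ¬ n < 1024) : pvT n = pvT (n - 1) + pvT (n - 1024) + 1 := by
  rw [pvT]; rw [if_neg h]

-- A's while loop: pop from the front, push children of n ≥ 1024, count leaves in res
def pvLoop (res : Int) (nums : List Int) : Int :=
  match nums with
  | [] => res
  | n :: rest =>
      if n ≥ 1024 then pvLoop res (rest ++ [n - 1] ++ [n - 1024])
      else pvLoop (res + 1) rest
termination_by (nums.map pvT).sum
decreasing_by
  · simp only [List.map_append, List.sum_append, List.map_cons, List.sum_cons, List.map_nil,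
      List.sum_nil]
    have := pvT_big (n := n) (by omega)
    omega
  · simp only [List.map_cons, List.sum_cons]
    have := pvT_pos n
    omega

def calc_f (num : Int) : Int :=
  if num < 1024 ∧ num > 0 then 1
  else pvLoop 0 [num]

-- ===== PORT B =====
-- indices n-1 and n-1024 are always in range in Source B, so pyGetD is exact here
def calc_f_alt (num : Int) : Int :=
  if num < 1024 then 1
  else
    let dp := (PySem.List.pyRange 1024 (num + 1) 1).foldl
      (fun dp n => dp ++ [PySem.List.pyGetD dp (n - 1) 0 + PySem.List.pyGetD dp (n - 1024) 0])
      (List.replicate 1024 1)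
    PySem.List.pyGetD dp num 0

-- ===== PRECONDITION & SPEC =====
def Spec_calc_f (num : Int) (out : Int) : Prop := out = calc_f_alt num
instance (num : Int) (out : Int) : Decidable (Spec_calc_f num out) := by unfold Spec_calc_f; infer_instance

-- ===== CLAIM (what is proved, stated in full; the proofs are below) =====
def Claim_equal_calc_f : Prop := ∀ (num : Int), Dom_calc_f num → Spec_calc_f num (calc_f num)

-- ===== LEMMAS AND PROOFS =====

-- the mathematical function both programs compute
def pvL (n : Int) : Int :=
  if n < 1024 then 1 else pvL (n - 1) + pvL (n - 1024)
termination_by n.toNat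
decreasing_by all_goals omega

theorem pvL_small {n : Int} (h : n < 1024) : pvL n = 1 := by
  rw [pvL]; rw [if_pos h]

theorem pvL_big {n : Int} (h : ¬ n < 1024) : pvL n = pvL (n - 1) + pvL (n - 1024) := by
  rw [pvL]; rw [if_neg h]

theorem pvLoop_eq (res : Int) (nums : List Int) :
    pvLoop res nums = res + (nums.map pvL).sum := by
  fun_induction pvLoop with
  | case1 res => simp
  | case2 res n rest h ih =>
      rw [ih]
      simp only [List.map_append, List.sum_append, List.map_cons, List.sum_cons, List.map_nil,
        List.sum_nil]
      have := pvL_big (n := n) (by omega)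
      omega
  | case3 res n rest h ih =>
      rw [ih]
      simp only [List.map_cons, List.sum_cons]
      have := pvL_small (n := n) (by omega)
      omega

theorem calc_f_eq_L (num : Int) : calc_f num = pvL num := by
  unfold calc_f
  split
  · next h => rw [pvL_small h.1]
  · rw [pvLoop_eq]
    simp

-- the DP invariant for B's fold
theorem dp_invariant (m : Nat) (hm : 1023 ≤ m) :
    let dp := (PySem.List.pyRange 1024 ((m : Int) + 1) 1).foldl
      (fun dp n => dp ++ [PySem.List.pyGetD dp (n - 1) 0 + PySem.List.pyGetD dp (n - 1024) 0])
      (List.replicate 1024 (1 : Int))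
    dp.length = m + 1 ∧ ∀ i : Nat, i ≤ m → dp.getD i 0 = pvL (i : Int) := by
  induction m with
  | zero => omega
  | succ m ih =>
      by_cases hbase : m < 1023
      · -- m + 1 = 1023: empty range, dp = replicate
        have hm1 : m = 1022 := by omega
        subst hm1
        have e : (((1022 + 1 : Nat)) : Int) + 1 = 1024 := by norm_num
        rw [e, PySem.List.pyRange_one_eq_nil (by norm_num)]
        refine ⟨by rw [List.foldl_nil, List.length_replicate], ?_⟩
        intro i hi
        rw [List.foldl_nil, List.getD_eq_getElem?_getD]
        rw [List.getElem?_replicate]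
        rw [if_pos (by omega)]
        simp [pvL_small (show (i : Int) < 1024 by omega)]
      · have hm' : 1023 ≤ m := by omega
        obtain ⟨hlen, hval⟩ := ih hm'
        -- split the range: pyRange 1024 (m+2) = pyRange 1024 (m+1) ++ [m+1]
        have e : (((m + 1 : Nat)) : Int) + 1 = ((m : Int) + 1) + 1 := by push_cast; ring
        rw [e, PySem.List.pyRange_one_succ_right (by omega)]
        rw [List.foldl_append, List.foldl_cons, List.foldl_nil]
        set dp := (PySem.List.pyRange 1024 ((m : Int) + 1) 1).foldl
          (fun dp n => dp ++ [PySem.List.pyGetD dp (n - 1) 0 + PySem.List.pyGetD dp (n - 1024) 0])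
          (List.replicate 1024 (1 : Int)) with hdp
        have hget : ∀ j : Nat, j ≤ m →
            PySem.List.pyGetD dp (j : Int) 0 = pvL (j : Int) := by
          intro j hj
          rw [PySem.List.pyGetD_natCast]
          exact hval j hj
        have h1 : ((m : Int) + 1) - 1 = ((m : Nat) : Int) := by omega
        have h2 : ((m : Int) + 1) - 1024 = (((m + 1 - 1024 : Nat)) : Int) := by omega
        have hnew : PySem.List.pyGetD dp ((m : Int) + 1 - 1) 0
            + PySem.List.pyGetD dp ((m : Int) + 1 - 1024) 0 = pvL ((m : Int) + 1) := by
          rw [h1, h2, hget m le_rfl, hget (m + 1 - 1024) (by omega)]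
          rw [pvL_big (show ¬ ((m : Int) + 1) < 1024 by omega)]
          rw [h1, h2]
        constructor
        · rw [List.length_append, hlen, List.length_cons, List.length_nil]
        · intro i hi
          by_cases hilt : i ≤ m
          · rw [List.getD_eq_getElem?_getD, List.getElem?_append_left (by omega),
                ← List.getD_eq_getElem?_getD]
            exact hval i hilt
          · have hie : i = m + 1 := by omega
            subst hie
            have ec : (((m + 1 : Nat)) : Int) = (m : Int) + 1 := by push_cast; ring
            rw [List.getD_eq_getElem?_getD, List.getElem?_append_right (by omega), hlen,
                Nat.sub_self, List.getElem?_cons_zero, Option.getD_some, ec]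
            exact hnew

theorem calc_f_alt_eq_L (num : Int) : calc_f_alt num = pvL num := by
  unfold calc_f_alt
  split
  · next h => rw [pvL_small h]
  · next h =>
    have h0 : 0 ≤ num := by omega
    have hnum : num = ((num.toNat : Nat) : Int) := by omega
    obtain ⟨hlen, hval⟩ := dp_invariant num.toNat (by omega)
    rw [hnum]
    rw [PySem.List.pyGetD_natCast]
    exact hval num.toNat le_rfl

-- ===== VERDICT (by name: the statement is the Claim_ definition above) =====
theorem calc_f_spec : Claim_equal_calc_f := by
  intro num _
  unfold Spec_calc_f
  rw [calc_f_eq_L, calc_f_alt_eq_L]
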